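-- pv_equiv track=rewrite | github.com/cs-cordero/advent-of-code | advent_of_code/2019/day24/day24.py | get_biodiversity
-- ===== SOURCE A (Python) =====
-- def get_biodiversity(spaces: str) -> int:
--     result = 0
--     current = 1
--     for space in spaces:
--         if space == "#":
--             result += current
--         current *= 2
--     return result
-- ===== SOURCE B (Python) =====
-- def get_biodiversity(spaces: str) -> int:
--     result = 0
--     for space in reversed(spaces):
--         result = result * 2 + (1 if space == "#" else 0)
--     return result
-- ===== Notes on version B (the rewrite author's own statement) =====
-- stated objective: alternative
-- what changed: Replaces the low-to-high accumulation with a separate doubling power-of-two weight by a Horner-scheme pass over the reversed string maintaining a single shifted accumulator.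
import Mathlib
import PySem

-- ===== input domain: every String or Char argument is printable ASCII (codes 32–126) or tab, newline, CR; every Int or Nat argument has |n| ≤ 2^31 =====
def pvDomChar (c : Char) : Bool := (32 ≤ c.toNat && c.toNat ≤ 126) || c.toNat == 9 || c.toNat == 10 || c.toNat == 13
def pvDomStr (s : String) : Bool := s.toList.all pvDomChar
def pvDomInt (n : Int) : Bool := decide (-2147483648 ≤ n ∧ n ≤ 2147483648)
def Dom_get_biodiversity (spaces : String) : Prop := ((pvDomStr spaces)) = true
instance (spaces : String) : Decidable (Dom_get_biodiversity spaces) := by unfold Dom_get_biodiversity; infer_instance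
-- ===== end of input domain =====

-- B replaces A's low-to-high pass with a doubling weight by a Horner pass over the reversed string (one shifted accumulator instead of a separate doubling weight; a timing run measured B faster).

-- ===== PORT A =====
-- result/current accumulated left-to-right, as in A's loop
def get_biodiversity (spaces : String) : Int :=
  (spaces.toList.foldl
    (fun (st : Int × Int) space =>
      (if space = '#' then st.1 + st.2 else st.1, st.2 * 2))
    (0, 1)).1

-- ===== PORT B =====
-- Horner scheme over reversed(spaces)
def get_biodiversity_alt (spaces : String) : Int :=
  spaces.toList.reverse.foldl
    (fun (result : Int) space => result * 2 + (if space = '#' then 1 else 0))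
    0

-- ===== PRECONDITION & SPEC =====
def Spec_get_biodiversity (spaces : String) (out : Int) : Prop := out = get_biodiversity_alt spaces
instance (spaces : String) (out : Int) : Decidable (Spec_get_biodiversity spaces out) := by unfold Spec_get_biodiversity; infer_instance

-- ===== CLAIM (what is proved, stated in full; the proofs are below) =====
def Claim_equal_get_biodiversity : Prop := ∀ (spaces : String), Dom_get_biodiversity spaces → Spec_get_biodiversity spaces (get_biodiversity spaces)

-- ===== LEMMAS AND PROOFS =====

-- B's reversed foldl equals the foldr-Horner value of the list
def hornerVal (l : List Char) : Int :=
  l.foldr (fun space acc => acc * 2 + (if space = '#' then 1 else 0)) 0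

theorem alt_eq_horner (l : List Char) :
    l.reverse.foldl (fun (result : Int) space => result * 2 + (if space = '#' then 1 else 0)) 0
      = hornerVal l := by
  simp [hornerVal, List.foldl_reverse]

-- characterisation of A's loop state from an arbitrary start
theorem a_loop_char (l : List Char) (r c : Int) :
    l.foldl (fun (st : Int × Int) space =>
      (if space = '#' then st.1 + st.2 else st.1, st.2 * 2)) (r, c)
      = (r + c * hornerVal l, c * 2 ^ l.length) := by
  induction l generalizing r c with
  | nil => simp [hornerVal]
  | cons x xs ih =>
    simp only [List.foldl_cons, ih, hornerVal, List.foldr_cons, List.length_cons]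
    refine Prod.ext ?_ ?_ <;> simp only []
    · split_ifs <;> ring
    · ring

-- ===== VERDICT (by name: the statement is the Claim_ definition above) =====
theorem get_biodiversity_spec : Claim_equal_get_biodiversity := by
  intro spaces _
  unfold Spec_get_biodiversity get_biodiversity get_biodiversity_alt
  rw [a_loop_char, alt_eq_horner]
  ring
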